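-- pv_equiv track=rewrite | github.com/ruandrinho/nicetry | backend/game/models.py | remove_successive_letters
-- ===== SOURCE A (Python) =====
-- import itertools
--
-- def remove_successive_letters(s: str) -> str:
--     result = []
--     for char, group in itertools.groupby(s):
--         if char.isdigit() or char in 'ix+':
--             result.extend(list(group))
--         else:
--             result.append(char)
--     return ''.join(result)
-- ===== SOURCE B (Python) =====
-- import re
--
-- def remove_successive_letters(s: str) -> str:
--     def repl(m):
--         c = m.group(1)
--         return m.group(0) if (c.isdigit() or c in 'ix+') else c
--     return re.sub(r'(.)\1+', repl, s, flags=re.S)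
-- ===== Notes on version B (the rewrite author's own statement) =====
-- stated objective: idiomatic
-- what changed: Replaced the explicit itertools.groupby loop with a single re.sub over maximal runs of 2+ identical characters, a callback keeping the full run for digits/ix+ and one character otherwise.
import Mathlib
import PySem

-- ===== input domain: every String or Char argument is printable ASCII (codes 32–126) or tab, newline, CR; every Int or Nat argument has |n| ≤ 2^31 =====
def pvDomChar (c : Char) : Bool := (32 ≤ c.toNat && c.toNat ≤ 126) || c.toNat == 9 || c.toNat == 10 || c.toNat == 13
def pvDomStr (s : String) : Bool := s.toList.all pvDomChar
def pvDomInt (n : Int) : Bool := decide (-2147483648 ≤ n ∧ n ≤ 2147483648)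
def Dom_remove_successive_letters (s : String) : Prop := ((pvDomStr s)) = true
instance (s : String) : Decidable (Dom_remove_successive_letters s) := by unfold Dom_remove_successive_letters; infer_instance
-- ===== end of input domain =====

-- B replaces the explicit groupby traversal with one re.sub over maximal 2+ runs (idiomatic, same cost).

-- shared predicate: "char.isdigit() or char in 'ix+'" (exact on the ASCII domain)
def pvKeep (c : Char) : Bool := PySem.Chars.isdigit c || c == 'i' || c == 'x' || c == '+'

-- ===== PORT A =====
-- itertools.groupby: successive equal elements, as (key, group) pairs
def pvGroupby : List Char → List (Char × List Char)
  | [] => []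
  | c :: l => (c, c :: l.takeWhile (· == c)) :: pvGroupby (l.dropWhile (· == c))
termination_by l => l.length
decreasing_by simpa using Nat.lt_succ_of_le (List.length_dropWhile_le _ _)

def remove_successive_letters (s : String) : String :=
  -- for char, group in groupby(s): extend(list(group)) if keep else append(char)
  String.mk ((pvGroupby s.toList).foldl
    (fun result cg => result ++ (if pvKeep cg.1 then cg.2 else [cg.1])) [])

-- ===== PORT B =====
-- hand-written, exact semantics of re.sub(r'(.)\1+', repl, s, flags=re.S):
-- scan left to right; at each position, a character followed by ≥1 copies of itself is a
-- maximal match whose replacement is repl's value (full run for digits/ix+, else one char);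
-- an unrepeated character is not matched and is copied through unchanged.
def pvReSubRuns : List Char → List Char
  | [] => []
  | c :: l =>
    let run := l.takeWhile (· == c)
    if run.isEmpty then c :: pvReSubRuns l
    else (if pvKeep c then c :: run else [c]) ++ pvReSubRuns (l.dropWhile (· == c))
termination_by l => l.length
decreasing_by
  · simp
  · simpa using Nat.lt_succ_of_le (List.length_dropWhile_le _ _)

def remove_successive_letters_alt (s : String) : String :=
  String.mk (pvReSubRuns s.toList)

-- ===== PRECONDITION & SPEC =====
def Spec_remove_successive_letters (s : String) (out : String) : Prop := out = remove_successive_letters_alt s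
instance (s : String) (out : String) : Decidable (Spec_remove_successive_letters s out) := by unfold Spec_remove_successive_letters; infer_instance

-- ===== CLAIM (what is proved, stated in full; the proofs are below) =====
def Claim_equal_remove_successive_letters : Prop := ∀ (s : String), Dom_remove_successive_letters s → Spec_remove_successive_letters s (remove_successive_letters s)

-- ===== LEMMAS AND PROOFS =====

-- A's foldl with list-append accumulator is a flatMap over the groups
theorem pv_foldA_flatMap (gs : List (Char × List Char)) (acc : List Char) :
    gs.foldl (fun result cg => result ++ (if pvKeep cg.1 then cg.2 else [cg.1])) acc
      = acc ++ gs.flatMap (fun cg => if pvKeep cg.1 then cg.2 else [cg.1]) := by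
  induction gs generalizing acc with
  | nil => simp
  | cons g gs ih => simp [List.foldl, ih, List.append_assoc]

theorem pv_dropWhile_of_takeWhile_nil {p : Char → Bool} {l : List Char}
    (h : l.takeWhile p = []) : l.dropWhile p = l := by
  cases l with
  | nil => rfl
  | cons a t =>
    by_cases hp : p a = true
    · simp [hp] at h
    · simp [hp]

theorem pv_main : ∀ (n : ℕ) (l : List Char), l.length ≤ n →
    (pvGroupby l).flatMap (fun cg => if pvKeep cg.1 then cg.2 else [cg.1]) = pvReSubRuns l := by
  intro n
  induction n with
  | zero =>
    intro l hl
    have : l = [] := List.eq_nil_of_length_eq_zero (Nat.le_zero.mp hl)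
    subst this; simp [pvGroupby, pvReSubRuns]
  | succ n ih =>
    intro l hl
    cases l with
    | nil => simp [pvGroupby, pvReSubRuns]
    | cons c t =>
      rw [pvGroupby, pvReSubRuns]
      simp only [List.flatMap_cons]
      by_cases he : (t.takeWhile (· == c)).isEmpty
      · have hnil : t.takeWhile (· == c) = [] := by
          simpa [List.isEmpty_iff] using he
        have hdrop : t.dropWhile (· == c) = t := pv_dropWhile_of_takeWhile_nil hnil
        have iht := ih t (Nat.le_of_succ_le_succ hl)
        rw [hdrop, iht, hnil]
        simp
      · have hle : (t.dropWhile (· == c)).length ≤ n :=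
          Nat.le_of_succ_le_succ (Nat.le_trans (Nat.succ_le_succ (List.length_dropWhile_le _ _)) hl)
        have ihd := ih _ hle
        rw [ihd]
        simp [he]

-- ===== VERDICT (by name: the statement is the Claim_ definition above) =====
theorem remove_successive_letters_spec : Claim_equal_remove_successive_letters := by
  intro s _
  unfold Spec_remove_successive_letters remove_successive_letters remove_successive_letters_alt
  rw [pv_foldA_flatMap, List.nil_append, pv_main s.toList.length s.toList (Nat.le_refl _)]
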